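-- pv_equiv track=rewrite | github.com/zRyyH/oftalmocentervet | Robo/SicoobReleases/conciliador.py | filtrar_debitos
-- ===== SOURCE A (Python) =====
-- def eh_estorno(registro: dict) -> bool:
--     """Verifica se o registro é um estorno."""
--     descricao = (registro.get("descricao") or "").upper()
--     desc_complementar = (registro.get("desc_inf_complementar") or "").upper()
--     return "ESTORNO" in descricao or "ESTORNO" in desc_complementar
--
-- def eh_devolucao(registro: dict, mapeamento_devolucoes: list) -> tuple[bool, str | None]:
--     """
--     Verifica se o registro é uma devolução comparando desc_inf_complementar
--     com description_return do mapeamento.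
--     Retorna (is_devolucao, description_payment_vinculado).
--     """
--     desc_complementar = registro.get("desc_inf_complementar") or ""
--     for item in mapeamento_devolucoes:
--         description_return = item.get("description_return")
--         if description_return and description_return in desc_complementar:
--             return True, item.get("description_payment")
--     return False, None
--
-- def filtrar_debitos(sicoob: list, mapeamento_devolucoes: list = None) -> list:
--     resultado = []
--     mapeamento_devolucoes = mapeamento_devolucoes or []
--     for s in sicoob:
--         # Inclui DEBITOS normais
--         if s.get("tipo", "").upper() == "DEBITO":
--             resultado.append(s)
--             continue
--         # Inclui registros com ESTORNO na descrição, independente do tipo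
--         if eh_estorno(s):
--             resultado.append(s)
--             continue
--         # Inclui devoluções (independente de crédito ou débito)
--         is_devolucao, _ = eh_devolucao(s, mapeamento_devolucoes)
--         if is_devolucao:
--             resultado.append(s)
--     return resultado
-- ===== SOURCE B (Python) =====
-- def filtrar_debitos(sicoob: list, mapeamento_devolucoes: list = None) -> list:
--     # Staged passes over an index set: one pass collects debit indices, one collects
--     # estorno indices, then the devolution scan is done with the LOOP ORDER INVERTED
--     # (each pattern scanned against all records); a final ordered pass emits the
--     # records whose index landed in the union. Order is preserved by that last pass,
--     # and the union of the three index sets is exactly A's disjunction.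
--     keep = set()
--     for i, s in enumerate(sicoob):
--         if s.get("tipo", "").upper() == "DEBITO":
--             keep.add(i)
--     for i, s in enumerate(sicoob):
--         if "ESTORNO" in (s.get("descricao") or "").upper() \
--            or "ESTORNO" in (s.get("desc_inf_complementar") or "").upper():
--             keep.add(i)
--     for item in (mapeamento_devolucoes or []):
--         padrao = item.get("description_return")
--         if padrao:
--             for i, s in enumerate(sicoob):
--                 if padrao in (s.get("desc_inf_complementar") or ""):
--                     keep.add(i)
--     return [s for i, s in enumerate(sicoob) if i in keep]
-- ===== Notes on version B (the rewrite author's own statement) =====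
-- stated objective: alternative
-- what changed: Instead of A's single pass that tests each record against a disjunction (with an inner scan of the mapping per record), B runs staged index-collection passes - debits, estornos, then the devolution scan with the loop order inverted (each pattern scanned against all records) - unioning kept indices into a set, and a final ordered pass emits the records whose index is in the union.
import Mathlib
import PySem

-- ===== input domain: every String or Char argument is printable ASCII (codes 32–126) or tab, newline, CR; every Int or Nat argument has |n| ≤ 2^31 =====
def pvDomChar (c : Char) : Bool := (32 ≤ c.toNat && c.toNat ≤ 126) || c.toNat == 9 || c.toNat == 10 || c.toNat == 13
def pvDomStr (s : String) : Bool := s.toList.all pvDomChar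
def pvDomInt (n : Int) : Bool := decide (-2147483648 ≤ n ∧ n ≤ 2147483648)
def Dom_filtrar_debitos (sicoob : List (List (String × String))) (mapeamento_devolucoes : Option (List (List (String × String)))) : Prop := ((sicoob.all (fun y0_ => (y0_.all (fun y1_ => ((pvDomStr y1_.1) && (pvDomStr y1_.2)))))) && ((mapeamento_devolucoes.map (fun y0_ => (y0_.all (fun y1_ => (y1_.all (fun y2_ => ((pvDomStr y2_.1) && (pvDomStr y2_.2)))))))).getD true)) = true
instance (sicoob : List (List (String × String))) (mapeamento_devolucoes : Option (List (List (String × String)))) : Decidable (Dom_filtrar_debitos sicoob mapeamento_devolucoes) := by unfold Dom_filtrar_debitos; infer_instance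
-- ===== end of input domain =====

-- ===== PORT A =====
-- B replaces A's single record pass (disjunction with an inner mapping scan per
-- record) by staged index-collection passes into a set — the devolution scan with
-- patterns outer, records inner — plus a final ordered emit pass (same cost class).
def eh_estorno (registro : PySem.Dict String String) : Bool :=
  let descricao := PySem.Str.upper ((registro.get? "descricao").getD "")
  let desc_complementar := PySem.Str.upper ((registro.get? "desc_inf_complementar").getD "")
  PySem.Str.isIn "ESTORNO" descricao || PySem.Str.isIn "ESTORNO" desc_complementar

-- the 'for item in mapeamento_devolucoes: ... return' loop of eh_devolucao
def eh_devolucao_go (desc_complementar : String) : List (PySem.Dict String String) → Bool × Option String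
  | [] => (false, none)
  | item :: rest =>
      let description_return := (item.get? "description_return").getD ""
      if description_return ≠ "" && PySem.Str.isIn description_return desc_complementar then
        (true, item.get? "description_payment")
      else
        eh_devolucao_go desc_complementar rest

def eh_devolucao (registro : PySem.Dict String String) (mapeamento_devolucoes : List (PySem.Dict String String)) : Bool × Option String :=
  let desc_complementar := (registro.get? "desc_inf_complementar").getD ""
  eh_devolucao_go desc_complementar mapeamento_devolucoes

def filtrar_debitos (sicoob : List (List (String × String))) (mapeamento_devolucoes : Option (List (List (String × String)))) : List (List (String × String)) :=
  let mapa := (mapeamento_devolucoes.getD []).map PySem.Dict.mk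
  sicoob.foldl (fun resultado s =>
    let d := PySem.Dict.mk s
    if PySem.Str.upper ((d.get? "tipo").getD "") == "DEBITO" then resultado ++ [s]
    else if eh_estorno d then resultado ++ [s]
    else if (eh_devolucao d mapa).1 then resultado ++ [s]
    else resultado) []

-- ===== PORT B =====
-- pass 1: 'for i, s in enumerate(sicoob): if tipo == DEBITO: keep.add(i)'
def pvPassDeb (sicoob : List (List (String × String))) (keep : PySem.Set Int) : PySem.Set Int :=
  (PySem.List.enumerate sicoob 0).foldl (fun k p =>
    if PySem.Str.upper (((PySem.Dict.mk p.2).get? "tipo").getD "") == "DEBITO"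
    then PySem.Set.add k p.1 else k) keep

-- pass 2: the ESTORNO pass
def pvPassEst (sicoob : List (List (String × String))) (keep : PySem.Set Int) : PySem.Set Int :=
  (PySem.List.enumerate sicoob 0).foldl (fun k p =>
    if PySem.Str.isIn "ESTORNO" (PySem.Str.upper (((PySem.Dict.mk p.2).get? "descricao").getD ""))
       || PySem.Str.isIn "ESTORNO" (PySem.Str.upper (((PySem.Dict.mk p.2).get? "desc_inf_complementar").getD ""))
    then PySem.Set.add k p.1 else k) keep

-- pass 3: patterns OUTER, records inner
def pvPassDev (sicoob : List (List (String × String))) (mapa : List (PySem.Dict String String)) (keep : PySem.Set Int) : PySem.Set Int :=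
  mapa.foldl (fun k item =>
    if ((item.get? "description_return").getD "") ≠ "" then
      (PySem.List.enumerate sicoob 0).foldl (fun k' p =>
        if PySem.Str.isIn ((item.get? "description_return").getD "")
             (((PySem.Dict.mk p.2).get? "desc_inf_complementar").getD "")
        then PySem.Set.add k' p.1 else k') k
    else k) keep

def filtrar_debitos_alt (sicoob : List (List (String × String))) (mapeamento_devolucoes : Option (List (List (String × String)))) : List (List (String × String)) :=
  let mapa := (mapeamento_devolucoes.getD []).map PySem.Dict.mk
  let keep := pvPassDev sicoob mapa (pvPassEst sicoob (pvPassDeb sicoob PySem.Set.empty))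
  (PySem.List.enumerate sicoob 0).filterMap (fun p =>
    if PySem.Set.contains keep p.1 then some p.2 else none)

-- ===== PRECONDITION & SPEC =====
def Spec_filtrar_debitos (sicoob : List (List (String × String))) (mapeamento_devolucoes : Option (List (List (String × String)))) (out : List (List (String × String))) : Prop := out = filtrar_debitos_alt sicoob mapeamento_devolucoes
instance (sicoob : List (List (String × String))) (mapeamento_devolucoes : Option (List (List (String × String)))) (out : List (List (String × String))) : Decidable (Spec_filtrar_debitos sicoob mapeamento_devolucoes out) := by unfold Spec_filtrar_debitos; infer_instance

-- ===== CLAIM (what is proved, stated in full; the proofs are below) =====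
def Claim_equal_filtrar_debitos : Prop := ∀ (sicoob : List (List (String × String))) (mapeamento_devolucoes : Option (List (List (String × String)))), Dom_filtrar_debitos sicoob mapeamento_devolucoes → Spec_filtrar_debitos sicoob mapeamento_devolucoes (filtrar_debitos sicoob mapeamento_devolucoes)

-- ===== LEMMAS AND PROOFS =====

-- the per-record condition both programs decide, record by record
def pvCond (mapa : List (PySem.Dict String String)) (s : List (String × String)) : Bool :=
  PySem.Str.upper (((PySem.Dict.mk s).get? "tipo").getD "") == "DEBITO"
  || (PySem.Str.isIn "ESTORNO" (PySem.Str.upper (((PySem.Dict.mk s).get? "descricao").getD ""))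
      || PySem.Str.isIn "ESTORNO" (PySem.Str.upper (((PySem.Dict.mk s).get? "desc_inf_complementar").getD "")))
  || mapa.any (fun item =>
       ((item.get? "description_return").getD "" ≠ "")
       && PySem.Str.isIn ((item.get? "description_return").getD "")
            (((PySem.Dict.mk s).get? "desc_inf_complementar").getD ""))

-- membership in a conditional-add fold
lemma mem_foldl_if_add {α : Type} (f : α → Bool) (g : α → Int) (l : List α)
    (k0 : PySem.Set Int) (y : Int) :
    (y ∈ l.foldl (fun k p => if f p then PySem.Set.add k (g p) else k) k0)
      ↔ y ∈ k0 ∨ ∃ p ∈ l, f p = true ∧ y = g p := by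
  induction l generalizing k0 with
  | nil => simp
  | cons a l ih =>
      simp only [List.foldl_cons]
      by_cases h : f a = true
      · rw [if_pos h, ih]
        simp only [PySem.Set.mem_add, List.mem_cons]
        constructor
        · rintro ((h0 | h0) | ⟨p, hp, hc⟩)
          · exact Or.inl h0
          · exact Or.inr ⟨a, Or.inl rfl, h, h0⟩
          · exact Or.inr ⟨p, Or.inr hp, hc⟩
        · rintro (h0 | ⟨p, (rfl | hp), hf, hy⟩)
          · exact Or.inl (Or.inl h0)
          · exact Or.inl (Or.inr hy)
          · exact Or.inr ⟨p, hp, hf, hy⟩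
      · rw [if_neg h, ih]
        simp only [List.mem_cons]
        constructor
        · rintro (h0 | ⟨p, hp, hc⟩)
          · exact Or.inl h0
          · exact Or.inr ⟨p, Or.inr hp, hc⟩
        · rintro (h0 | ⟨p, (rfl | hp), hf, hy⟩)
          · exact Or.inl h0
          · exact absurd hf h
          · exact Or.inr ⟨p, hp, hf, hy⟩

-- membership in a conditional-add fold over enumerate, at an in-range index
lemma mem_enum_fold (f : List (String × String) → Bool)
    (sicoob : List (List (String × String))) (k0 : PySem.Set Int) (k : Nat)
    (hk : k < sicoob.length) :
    ((k : Int) ∈ (PySem.List.enumerate sicoob 0).foldl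
        (fun s p => if f p.2 then PySem.Set.add s p.1 else s) k0)
      ↔ (k : Int) ∈ k0 ∨ f sicoob[k] = true := by
  rw [mem_foldl_if_add (fun (p : Int × List (String × String)) => f p.2) (fun p => p.1)
        (PySem.List.enumerate sicoob 0) k0 (k : Int)]
  constructor
  · rintro (h | ⟨p, hp, hf, hy⟩)
    · exact Or.inl h
    · rcases (PySem.List.mem_enumerate_iff _ _ _).1 hp with ⟨j, hj, rfl⟩
      have : k = j := by simpa using hy
      subst this; exact Or.inr hf
  · rintro (h | h)
    · exact Or.inl h
    · refine Or.inr ⟨((k : Int), sicoob[k]), ?_, h, by simp⟩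
      exact (PySem.List.mem_enumerate_iff _ _ _).2 ⟨k, hk, by simp⟩

lemma mem_passDev (sicoob : List (List (String × String)))
    (mapa : List (PySem.Dict String String)) (k0 : PySem.Set Int) (k : Nat)
    (hk : k < sicoob.length) :
    ((k : Int) ∈ pvPassDev sicoob mapa k0)
      ↔ (k : Int) ∈ k0 ∨ ∃ item ∈ mapa,
          ((item.get? "description_return").getD "" ≠ "") ∧
          PySem.Str.isIn ((item.get? "description_return").getD "")
            (((PySem.Dict.mk sicoob[k]).get? "desc_inf_complementar").getD "") = true := by
  unfold pvPassDev
  induction mapa generalizing k0 with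
  | nil => simp
  | cons item rest ih =>
      simp only [List.foldl_cons]
      by_cases h : ((item.get? "description_return").getD "") = ""
      · rw [if_neg (by simp [h]), ih]
        simp only [List.mem_cons]
        constructor
        · rintro (h0 | ⟨it, hit, hc⟩)
          · exact Or.inl h0
          · exact Or.inr ⟨it, Or.inr hit, hc⟩
        · rintro (h0 | ⟨it, (rfl | hit), hne, hin⟩)
          · exact Or.inl h0
          · exact absurd h hne
          · exact Or.inr ⟨it, hit, hne, hin⟩
      · rw [if_pos h, ih,
          mem_enum_fold (fun s => PySem.Str.isIn ((item.get? "description_return").getD "")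
            (((PySem.Dict.mk s).get? "desc_inf_complementar").getD "")) sicoob k0 k hk]
        simp only [List.mem_cons]
        constructor
        · rintro ((h0 | h0) | ⟨it, hit, hc⟩)
          · exact Or.inl h0
          · exact Or.inr ⟨item, Or.inl rfl, h, h0⟩
          · exact Or.inr ⟨it, Or.inr hit, hc⟩
        · rintro (h0 | ⟨it, (rfl | hit), hne, hin⟩)
          · exact Or.inl (Or.inl h0)
          · exact Or.inl (Or.inr hin)
          · exact Or.inr ⟨it, hit, hne, hin⟩

-- the union of the three index passes decides exactly pvCond, index by index
lemma contains_keep (sicoob : List (List (String × String)))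
    (mapa : List (PySem.Dict String String)) (k : Nat) (hk : k < sicoob.length) :
    PySem.Set.contains
        (pvPassDev sicoob mapa (pvPassEst sicoob (pvPassDeb sicoob PySem.Set.empty))) (k : Int)
      = pvCond mapa sicoob[k] := by
  rw [Bool.eq_iff_iff, PySem.Set.contains_iff, mem_passDev sicoob mapa _ k hk]
  unfold pvPassEst pvPassDeb
  rw [mem_enum_fold (fun s => PySem.Str.isIn "ESTORNO" (PySem.Str.upper (((PySem.Dict.mk s).get? "descricao").getD ""))
       || PySem.Str.isIn "ESTORNO" (PySem.Str.upper (((PySem.Dict.mk s).get? "desc_inf_complementar").getD ""))) sicoob _ k hk,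
     mem_enum_fold (fun s => PySem.Str.upper (((PySem.Dict.mk s).get? "tipo").getD "") == "DEBITO") sicoob _ k hk]
  simp only [pvCond, PySem.Set.empty, List.not_mem_nil, false_or, Bool.or_eq_true,
    List.any_eq_true, Bool.and_eq_true, decide_eq_true_eq]

-- the final ordered pass over a membership test is a filter
lemma filterMap_enum_filter {α : Type} (xs : List α) (f : Int → Bool) (cond : α → Bool)
    (s : Int) (h : ∀ (k : Nat) (hk : k < xs.length), f (s + k) = cond xs[k]) :
    (PySem.List.enumerate xs s).filterMap (fun p => if f p.1 then some p.2 else none)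
      = xs.filter cond := by
  induction xs generalizing s with
  | nil => simp [PySem.List.enumerate_nil]
  | cons x xs ih =>
      rw [PySem.List.enumerate_cons]
      simp only [List.filterMap_cons, List.filter_cons]
      have h0 : f s = cond x := by simpa using h 0 (by simp)
      rw [h0, ih (s + 1) (fun k hk => by
        have := h (k + 1) (by simpa using Nat.succ_lt_succ hk)
        simpa [add_assoc, add_comm, add_left_comm] using this)]
      cases cond x <;> rfl

-- A's result is the filter of pvCond
lemma devolucao_go_any (dc : String) (mapa : List (PySem.Dict String String)) :
    (eh_devolucao_go dc mapa).1
      = mapa.any (fun item =>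
          ((item.get? "description_return").getD "" ≠ "")
          && PySem.Str.isIn ((item.get? "description_return").getD "") dc) := by
  induction mapa with
  | nil => simp [eh_devolucao_go]
  | cons item rest ih =>
      simp only [eh_devolucao_go, List.any_cons]
      by_cases hr : ((item.get? "description_return").getD "") = ""
      · simp [hr, ih]
      · by_cases hin : PySem.Chars.isIn ((item.get? "description_return").getD "").toList dc.toList = true
        · simp [hr, hin]
        · simp [hr, hin, ih]

lemma filtrar_A_eq_filter (sicoob : List (List (String × String)))
    (mapa : List (PySem.Dict String String)) :
    sicoob.foldl (fun resultado s =>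
      let d := PySem.Dict.mk s
      if PySem.Str.upper ((d.get? "tipo").getD "") == "DEBITO" then resultado ++ [s]
      else if eh_estorno d then resultado ++ [s]
      else if (eh_devolucao d mapa).1 then resultado ++ [s]
      else resultado) []
    = sicoob.filter (pvCond mapa) := by
  have hstep : ∀ (acc : List (List (String × String))) (s : List (String × String)),
      (let d := PySem.Dict.mk s
       if PySem.Str.upper ((d.get? "tipo").getD "") == "DEBITO" then acc ++ [s]
       else if eh_estorno d then acc ++ [s]
       else if (eh_devolucao d mapa).1 then acc ++ [s]
       else acc)
      = (if pvCond mapa s then acc ++ [s] else acc) := by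
    intro acc s
    show (if _ then acc ++ [s] else if _ then acc ++ [s] else if _ then acc ++ [s] else acc) = _
    unfold pvCond eh_estorno eh_devolucao
    rw [devolucao_go_any]
    rcases hb1 : PySem.Str.upper (((PySem.Dict.mk s).get? "tipo").getD "") == "DEBITO" with _ | _ <;>
      rcases hb2 : PySem.Str.isIn "ESTORNO" (PySem.Str.upper (((PySem.Dict.mk s).get? "descricao").getD ""))
           || PySem.Str.isIn "ESTORNO" (PySem.Str.upper (((PySem.Dict.mk s).get? "desc_inf_complementar").getD "")) with _ | _ <;>
      simp_all
  calc sicoob.foldl (fun resultado s =>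
        let d := PySem.Dict.mk s
        if PySem.Str.upper ((d.get? "tipo").getD "") == "DEBITO" then resultado ++ [s]
        else if eh_estorno d then resultado ++ [s]
        else if (eh_devolucao d mapa).1 then resultado ++ [s]
        else resultado) []
      = sicoob.foldl (fun resultado s =>
          if pvCond mapa s then resultado ++ [s] else resultado) [] := by
        refine PySem.List.foldl_congr_mem _ _ _ _ ?_
        intro acc s _
        exact hstep acc s
    _ = [] ++ sicoob.filter (pvCond mapa) := PySem.List.foldl_append_if_eq_filter _ _ _
    _ = sicoob.filter (pvCond mapa) := by simp

-- ===== VERDICT (by name: the statement is the Claim_ definition above) =====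
theorem filtrar_debitos_spec : Claim_equal_filtrar_debitos := by
  intro sicoob m _
  show filtrar_debitos sicoob m = filtrar_debitos_alt sicoob m
  unfold filtrar_debitos filtrar_debitos_alt
  rw [filtrar_A_eq_filter,
      filterMap_enum_filter sicoob _ (pvCond ((m.getD []).map PySem.Dict.mk)) 0
        (fun k hk => by
          have := contains_keep sicoob ((m.getD []).map PySem.Dict.mk) k hk
          simpa using this)]
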